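-- pv_equiv track=rewrite | github.com/dosilt/Programmers-Python-dosilt | Level1/옹알이 (2).py | solution
-- ===== SOURCE A (Python) =====
-- def check(bab, can_do):
--     temp = []
--     while True:
--         for n, can in enumerate(can_do):
--             if bab.startswith(can):
--                 if temp == []:
--                     temp.append(n)
--                 elif temp[-1] != n:
--                     temp.append(n)
--                 else:
--                     return False
--                 bab = bab[len(can):]
--                 if bab == '':
--                     return True
--                 break
--         else:
--             return False
--
-- def solution(babbling):
--     can_do = ['aya', 'ye', 'woo', 'ma']
--
--     answer = 0
--     for bab in babbling:
--         if check(bab, can_do):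
--             answer += 1
--         pass
--     return answer
-- ===== SOURCE B (Python) =====
-- SYLS = ['aya', 'ye', 'woo', 'ma']
--
-- def tokenize(word):
--     toks = []
--     i = 0
--     while i < len(word):
--         for k, s in enumerate(SYLS):
--             if word.startswith(s, i):
--                 toks.append(k)
--                 i += len(s)
--                 break
--         else:
--             return None
--     return toks
--
-- def solution(babbling):
--     answer = 0
--     for bab in babbling:
--         toks = tokenize(bab)
--         if toks is not None and toks != [] and all(a != b for a, b in zip(toks, toks[1:])):
--             answer += 1
--     return answer
-- ===== Notes on version B (the rewrite author's own statement) =====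
-- stated objective: alternative
-- what changed: B replaces A's single interleaved scan (match a syllable, immediately compare with the previous one, early-return mid-word) by two separate passes: full tokenization of the word into syllable indices, then a standalone check that the token list is non-empty and has no equal adjacent tokens.
import Mathlib
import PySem

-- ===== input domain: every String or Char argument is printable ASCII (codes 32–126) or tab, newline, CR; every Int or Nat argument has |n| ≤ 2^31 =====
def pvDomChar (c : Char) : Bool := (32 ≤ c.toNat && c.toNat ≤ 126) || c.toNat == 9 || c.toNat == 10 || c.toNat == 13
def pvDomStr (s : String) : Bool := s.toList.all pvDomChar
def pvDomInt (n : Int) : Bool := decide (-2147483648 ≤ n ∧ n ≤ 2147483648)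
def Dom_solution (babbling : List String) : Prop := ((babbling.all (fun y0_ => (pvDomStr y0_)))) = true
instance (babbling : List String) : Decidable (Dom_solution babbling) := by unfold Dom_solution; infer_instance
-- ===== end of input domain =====

-- B tokenizes the whole word first and checks the token list in a separate pass,
-- instead of A's single interleaved scan; objective: alternative decomposition (same cost).

-- ===== PORT A =====
-- the inner `for n, can in enumerate(can_do): if bab.startswith(can)` scan:
-- first matching syllable index together with the remainder bab[len(can):]
def findCanA (bab : List Char) : Option (Nat × List Char) :=
  if ['a','y','a'].isPrefixOf bab then some (0, bab.drop 3)
  else if ['y','e'].isPrefixOf bab then some (1, bab.drop 2)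
  else if ['w','o','o'].isPrefixOf bab then some (2, bab.drop 3)
  else if ['m','a'].isPrefixOf bab then some (3, bab.drop 2)
  else none

theorem findCanA_lt (bab : List Char) (n : Nat) (rest : List Char)
    (h : findCanA bab = some (n, rest)) : rest.length < bab.length := by
  unfold findCanA at h
  split_ifs at h with h1 h2 h3 h4 <;>
    obtain ⟨-, rfl⟩ := Prod.mk.injEq .. ▸ Option.some.inj h <;>
    simp only [List.length_drop]
  · have := (List.isPrefixOf_iff_prefix.mp h1).length_le; simp at this; omega
  · have := (List.isPrefixOf_iff_prefix.mp h2).length_le; simp at this; omega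
  · have := (List.isPrefixOf_iff_prefix.mp h3).length_le; simp at this; omega
  · have := (List.isPrefixOf_iff_prefix.mp h4).length_le; simp at this; omega

-- the `while True:` loop of check; temp carries the appended syllable indices
def checkA (bab : List Char) (temp : List Nat) : Bool :=
  match h : findCanA bab with
  | none => false
  | some (n, rest) =>
    if temp = [] then
      (if rest = [] then true else checkA rest [n])
    else if temp.getLast? ≠ some n then
      (if rest = [] then true else checkA rest (temp ++ [n]))
    else false
termination_by bab.length
decreasing_by all_goals exact findCanA_lt _ _ _ h

def solution (babbling : List String) : Int :=
  babbling.foldl (fun answer bab => if checkA bab.toList [] then answer + 1 else answer) 0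

-- ===== PORT B =====
-- which syllable matches at the current position, with the remainder
def matchSylB (w : List Char) : Option (Nat × List Char) :=
  if ['a','y','a'].isPrefixOf w then some (0, w.drop 3)
  else if ['y','e'].isPrefixOf w then some (1, w.drop 2)
  else if ['w','o','o'].isPrefixOf w then some (2, w.drop 3)
  else if ['m','a'].isPrefixOf w then some (3, w.drop 2)
  else none

theorem matchSylB_lt (w : List Char) (k : Nat) (rest : List Char)
    (h : matchSylB w = some (k, rest)) : rest.length < w.length :=
  findCanA_lt w k rest h

-- pass 1: full tokenization (none = some position matches no syllable)
def tokenizeB (w : List Char) : Option (List Nat) :=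
  if w = [] then some []
  else
    match h : matchSylB w with
    | none => none
    | some (k, rest) => (tokenizeB rest).map (fun ts => k :: ts)
termination_by w.length
decreasing_by all_goals exact matchSylB_lt _ _ _ h

-- pass 2: no two adjacent tokens equal
def noAdjB : List Nat → Bool
  | [] => true
  | [_] => true
  | a :: b :: t => (a ≠ b) && noAdjB (b :: t)

def validB (bab : String) : Bool :=
  match tokenizeB bab.toList with
  | none => false
  | some toks => (toks ≠ []) && noAdjB toks

def solution_alt (babbling : List String) : Int :=
  babbling.foldl (fun answer bab => if validB bab then answer + 1 else answer) 0

-- ===== PRECONDITION & SPEC =====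
def Spec_solution (babbling : List String) (out : Int) : Prop := out = solution_alt babbling
instance (babbling : List String) (out : Int) : Decidable (Spec_solution babbling out) := by unfold Spec_solution; infer_instance

-- ===== CLAIM (what is proved, stated in full; the proofs are below) =====
def Claim_equal_solution : Prop := ∀ (babbling : List String), Dom_solution babbling → Spec_solution babbling (solution babbling)

-- ===== LEMMAS AND PROOFS =====

-- unfolding lemmas for the two recursive functions (their dependent matches)
theorem checkA_of_none (bab : List Char) (temp : List Nat) (hm : findCanA bab = none) :
    checkA bab temp = false := by
  rw [checkA]; split <;> simp_all

theorem checkA_of_some (bab : List Char) (temp : List Nat) (n : Nat) (rest : List Char)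
    (hm : findCanA bab = some (n, rest)) :
    checkA bab temp =
      (if temp = [] then (if rest = [] then true else checkA rest [n])
       else if temp.getLast? ≠ some n then
         (if rest = [] then true else checkA rest (temp ++ [n]))
       else false) := by
  rw [checkA]; split <;> simp_all

theorem tokenizeB_nil : tokenizeB [] = some [] := by rw [tokenizeB]; rfl

theorem tokenizeB_of_none (w : List Char) (hne : w ≠ []) (hm : matchSylB w = none) :
    tokenizeB w = none := by
  rw [tokenizeB]; simp only [if_neg hne]; split <;> simp_all

theorem tokenizeB_of_some (w : List Char) (k : Nat) (rest : List Char)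
    (hne : w ≠ []) (hm : matchSylB w = some (k, rest)) :
    tokenizeB w = (tokenizeB rest).map (fun ts => k :: ts) := by
  rw [tokenizeB]; simp only [if_neg hne]; split <;> simp_all

theorem tokenizeB_eq_nil (w : List Char) (h : tokenizeB w = some []) : w = [] := by
  by_contra hne
  cases hm : matchSylB w with
  | none => rw [tokenizeB_of_none w hne hm] at h; simp at h
  | some p =>
    cases p with
    | mk k rest =>
      rw [tokenizeB_of_some w k rest hne hm] at h
      cases tokenizeB rest <;> simp at h

-- adjacency check seeded with the previous token (mirrors temp.getLast? in A)
def chainOk : Option Nat → List Nat → Bool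
  | _, [] => true
  | none, a :: t => chainOk (some a) t
  | some p, a :: t => (p ≠ a) && chainOk (some a) t

theorem chainOk_none_eq_noAdjB (ts : List Nat) : chainOk none ts = noAdjB ts := by
  induction ts with
  | nil => rfl
  | cons a t ih =>
    cases t with
    | nil => rfl
    | cons b t' =>
      have h2 : chainOk (some b) t' = noAdjB (b :: t') := by rw [← ih]; rfl
      show chainOk (some a) (b :: t') = noAdjB (a :: b :: t')
      simp only [chainOk, noAdjB, h2]

-- main invariant: A's loop equals "tokenize fully, then check the chain"
theorem checkA_eq (w : List Char) (temp : List Nat) :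
    checkA w temp =
      (match tokenizeB w with
       | none => false
       | some ts => (ts ≠ []) && chainOk temp.getLast? ts) := by
  cases hm : findCanA w with
  | none =>
    rw [checkA_of_none w temp hm]
    by_cases hw : w = []
    · subst hw; simp [tokenizeB_nil]
    · rw [tokenizeB_of_none w hw hm]
  | some p =>
    cases p with
    | mk n rest =>
      have hwne : w ≠ [] := by
        intro hw; subst hw; simp [findCanA] at hm
      have htok : tokenizeB w = (tokenizeB rest).map (fun ts => n :: ts) :=
        tokenizeB_of_some w n rest hwne hm
      rw [checkA_of_some w temp n rest hm, htok]
      by_cases htemp : temp = []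
      · subst htemp
        by_cases hrest : rest = []
        · subst hrest
          simp [tokenizeB_nil, chainOk]
        · simp only [if_neg hrest]
          rw [checkA_eq rest [n]]
          cases ht : tokenizeB rest with
          | none => simp
          | some ts =>
            have hts : ts ≠ [] := fun h => hrest (tokenizeB_eq_nil rest (h ▸ ht))
            simp [hts, chainOk, List.getLast?]
      · simp only [if_neg htemp]
        by_cases hlast : temp.getLast? ≠ some n
        · simp only [if_pos hlast]
          by_cases hrest : rest = []
          · subst hrest
            simp only [tokenizeB_nil, Option.map_some]
            cases hl : temp.getLast? with
            | none => exact absurd (List.getLast?_eq_none_iff.mp hl) htemp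
            | some p =>
              have : p ≠ n := by intro he; exact hlast (by rw [hl, he])
              simp [chainOk, this]
          · simp only [if_neg hrest]
            rw [checkA_eq rest (temp ++ [n])]
            cases ht : tokenizeB rest with
            | none => simp
            | some ts =>
              have hts : ts ≠ [] := fun h => hrest (tokenizeB_eq_nil rest (h ▸ ht))
              cases hl : temp.getLast? with
              | none => exact absurd (List.getLast?_eq_none_iff.mp hl) htemp
              | some p =>
                have hpn : p ≠ n := by intro he; exact hlast (by rw [hl, he])
                simp [hts, chainOk, hpn]
        · simp only [if_neg hlast]
          have hl : temp.getLast? = some n := not_ne_iff.mp hlast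
          cases ht : tokenizeB rest with
          | none => simp
          | some ts => simp [hl, chainOk]
termination_by w.length
decreasing_by all_goals exact findCanA_lt _ _ _ hm

theorem checkA_eq_validB (bab : String) : checkA bab.toList [] = validB bab := by
  rw [checkA_eq, validB]
  cases tokenizeB bab.toList with
  | none => rfl
  | some ts => simp [chainOk_none_eq_noAdjB]

-- ===== VERDICT (by name: the statement is the Claim_ definition above) =====
theorem solution_spec : Claim_equal_solution := by
  intro babbling _
  unfold Spec_solution solution solution_alt
  simp only [checkA_eq_validB]
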